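-- pv_equiv track=rewrite | github.com/Captain-oblivious1/terminalGraphics | src/Util.py | longestLineAndNumberLines
-- ===== SOURCE A (Python) =====
-- def longestLineAndNumberLines(text):
--     if text=="":
--         return 0,0
--
--     longest = 0
--     current = 0
--     nLines = 1
--     for ch in text:
--         if ch=='\n':
--             nLines += 1
--             if current>longest:
--                 longest = current
--             current = 0
--         else:
--             current += 1
--     if current>longest:
--         longest = current
--
--     return longest,nLines
-- ===== SOURCE B (Python) =====
-- def longestLineAndNumberLines(text):
--     if text == "":
--         return 0, 0
--     lines = text.split('\n')
--     return max(len(line) for line in lines), len(lines)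
-- ===== Notes on version B (the rewrite author's own statement) =====
-- stated objective: simpler
-- what changed: Replaces the fused single character loop with its three-accumulator state by splitting the text into the list of lines once and then taking the max of the line lengths and the list length.
import Mathlib
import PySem

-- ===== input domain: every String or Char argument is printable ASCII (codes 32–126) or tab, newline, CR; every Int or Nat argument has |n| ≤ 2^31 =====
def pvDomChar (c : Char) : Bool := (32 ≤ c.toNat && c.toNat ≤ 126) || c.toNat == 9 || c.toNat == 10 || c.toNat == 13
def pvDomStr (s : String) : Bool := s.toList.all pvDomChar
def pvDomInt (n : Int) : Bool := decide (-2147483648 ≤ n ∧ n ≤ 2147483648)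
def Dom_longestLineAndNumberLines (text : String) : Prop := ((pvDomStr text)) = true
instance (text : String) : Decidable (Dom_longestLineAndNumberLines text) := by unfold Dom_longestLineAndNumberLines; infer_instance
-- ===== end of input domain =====

-- B replaces A's fused three-accumulator character loop by splitting the text into the
-- list of lines once and then taking the max of their lengths and the list length (simpler).

-- ===== PORT A =====
-- the for-loop of A: state (longest, current, nLines)
def laLoop : List Char → Int × Int × Int → Int × Int × Int
  | [], s => s
  | ch :: rest, (longest, current, nLines) =>
    if ch == '\n' then
      laLoop rest (if current > longest then current else longest, 0, nLines + 1)
    else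
      laLoop rest (longest, current + 1, nLines)

def longestLineAndNumberLines (text : String) : Int × Int :=
  if text == "" then (0, 0)
  else
    let s := laLoop text.toList (0, 0, 1)
    (if s.2.1 > s.1 then s.2.1 else s.1, s.2.2)

-- ===== PORT B =====
-- text.split('\n') is ported as List.splitOn on the code points (exact for a one-char
-- separator); max(len(l) for l in lines) over the always-nonempty line list as max?.getD.
def longestLineAndNumberLines_alt (text : String) : Int × Int :=
  if text == "" then (0, 0)
  else
    let lines := text.toList.splitOn '\n'
    (((lines.map (fun l => (l.length : Int))).max?).getD 0, (lines.length : Int))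

-- ===== PRECONDITION & SPEC =====
def Spec_longestLineAndNumberLines (text : String) (out : Int × Int) : Prop := out = longestLineAndNumberLines_alt text
instance (text : String) (out : Int × Int) : Decidable (Spec_longestLineAndNumberLines text out) := by unfold Spec_longestLineAndNumberLines; infer_instance

-- ===== CLAIM (what is proved, stated in full; the proofs are below) =====
def Claim_equal_longestLineAndNumberLines : Prop := ∀ (text : String), Dom_longestLineAndNumberLines text → Spec_longestLineAndNumberLines text (longestLineAndNumberLines text)

-- ===== LEMMAS AND PROOFS =====

-- A's final max-step, as a named function (proof helper)
def laFinal (s : Int × Int × Int) : Int × Int := (if s.2.1 > s.1 then s.2.1 else s.1, s.2.2)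

-- the per-line lengths of a char list
def lineLens (l : List Char) : List Int := (l.splitOnP (· == '\n')).map (fun s => (s.length : Int))

theorem lineLens_nil : lineLens [] = [0] := by simp [lineLens, List.splitOnP_nil]

theorem lineLens_cons_nl (rest : List Char) :
    lineLens ('\n' :: rest) = 0 :: lineLens rest := by
  simp [lineLens, List.splitOnP_cons]

theorem lineLens_cons (c : Char) (rest : List Char) (h : (c == '\n') = false) :
    lineLens (c :: rest) = (lineLens rest).modifyHead (· + 1) := by
  simp only [lineLens, List.splitOnP_cons, h]
  cases rest.splitOnP (· == '\n') <;> simp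

theorem modifyHead_add_zero (l : List Int) : l.modifyHead (· + 0) = l := by
  cases l <;> simp

theorem modifyHead_modifyHead (f g : Int → Int) (l : List Int) :
    (l.modifyHead f).modifyHead g = l.modifyHead (fun x => g (f x)) := by
  cases l <;> simp

-- the key invariant: running A's loop from state (lo, cur, n) and applying A's final
-- max-step computes the max over the (cur-adjusted) line lengths, and n plus the number
-- of newline-separated pieces minus one.
theorem laLoop_spec (l : List Char) : ∀ (lo cur n : Int),
    laFinal (laLoop l (lo, cur, n))
      = (((lineLens l).modifyHead (· + cur)).foldl max lo, n + (lineLens l).length - 1) := by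
  induction l with
  | nil =>
    intro lo cur n
    simp only [laLoop, laFinal, lineLens_nil, List.modifyHead, List.foldl, List.length_cons,
      List.length_nil]
    refine Prod.ext ?_ ?_
    · show (if cur > lo then cur else lo) = max lo (0 + cur)
      rw [max_def]; split_ifs <;> omega
    · show n = n + ((0:Nat) + 1 : Nat) - 1
      push_cast; omega
  | cons c rest ih =>
    intro lo cur n
    by_cases hc : (c == '\n') = true
    · have hc' : c = '\n' := by simpa using hc
      subst hc'
      rw [lineLens_cons_nl]
      show laFinal (laLoop rest (if cur > lo then cur else lo, 0, n + 1)) = _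
      rw [ih, modifyHead_add_zero]
      have hmax : (if cur > lo then cur else lo) = max lo cur := by
        rw [max_def]; split_ifs <;> omega
      rw [hmax]
      refine Prod.ext ?_ ?_
      · simp [List.modifyHead]
      · simp only [List.length_cons]; push_cast; omega
    · have hc' : (c == '\n') = false := by simpa using hc
      rw [lineLens_cons c rest hc']
      show laFinal (laLoop (c :: rest) (lo, cur, n)) = _
      simp only [laLoop, hc', Bool.false_eq_true, if_false]
      rw [ih, modifyHead_modifyHead]
      have harg : (lineLens rest).modifyHead (· + (cur + 1))
          = (lineLens rest).modifyHead (fun x => x + 1 + cur) := by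
        cases lineLens rest with
        | nil => rfl
        | cons a t =>
          simp only [List.modifyHead]
          exact congrArg (· :: t) (show a + (cur + 1) = a + 1 + cur by omega)
      rw [harg]
      simp

theorem max?_getD_eq_foldl (l : List Char) :
    ((lineLens l).max?).getD 0 = (lineLens l).foldl max 0 := by
  obtain ⟨x, xs, h⟩ : ∃ x xs, l.splitOnP (· == '\n') = x :: xs := by
    cases h : l.splitOnP (· == '\n') with
    | nil => exact absurd h (List.splitOnP_ne_nil _ _)
    | cons x xs => exact ⟨x, xs, rfl⟩
  have hl : lineLens l = (x.length : Int) :: xs.map (fun s => (s.length : Int)) := by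
    simp [lineLens, h]
  rw [hl,
    show ((x.length : Int) :: xs.map (fun s => (s.length : Int))).max?
        = some (List.foldl max (x.length : Int) (xs.map (fun s => (s.length : Int)))) from rfl]
  have h0 : max 0 ((x.length : Int)) = (x.length : Int) :=
    max_eq_right (Int.natCast_nonneg _)
  simp only [List.foldl, Option.getD_some, h0]

-- ===== VERDICT (by name: the statement is the Claim_ definition above) =====
theorem longestLineAndNumberLines_spec : Claim_equal_longestLineAndNumberLines := by
  intro text _
  unfold Spec_longestLineAndNumberLines longestLineAndNumberLines longestLineAndNumberLines_alt
  by_cases h : text == ""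
  · simp [h]
  · simp only [h, Bool.false_eq_true, if_false]
    show laFinal (laLoop text.toList (0, 0, 1)) = _
    rw [laLoop_spec, modifyHead_add_zero,
      show (text.toList.splitOn '\n').map (fun l => (l.length : Int)) = lineLens text.toList
        from rfl,
      max?_getD_eq_foldl]
    refine Prod.ext ?_ ?_
    · rfl
    · show (1 : Int) + (lineLens text.toList).length - 1
        = ((text.toList.splitOn '\n').length : Int)
      have : (lineLens text.toList).length = (text.toList.splitOn '\n').length := by
        simp [lineLens]; rfl
      rw [this]; omega
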